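-- pv_equiv track=rewrite | github.com/miguel91it/datacompression-scientific-inititation | codigos/unburrowsWheelerTransform.py | posicaoNaStringL
-- ===== SOURCE A (Python) =====
-- def posicaoNaStringL (stringL, charStringF, ordemAparicaoStringF):
--
--     i = 0
--
--     ordemAparicao = 0
--
--     for elemento in stringL:
--
--         if elemento == charStringF:
--
--             ordemAparicao += 1
--
--             if ordemAparicao == ordemAparicaoStringF:
--
--                 return i
--
--         i += 1
-- ===== SOURCE B (Python) =====
-- def posicaoNaStringL(stringL, charStringF, ordemAparicaoStringF):
--     positions = [i for i, c in enumerate(stringL) if c == charStringF]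
--     if 1 <= ordemAparicaoStringF <= len(positions):
--         return positions[ordemAparicaoStringF - 1]
--     return None
-- ===== Notes on version B (the rewrite author's own statement) =====
-- stated objective: simpler
-- what changed: Replaces the counting scan with early exit by materializing the list of all match indices and doing a direct positional lookup with an explicit 1<=k<=len guard.
import Mathlib
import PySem

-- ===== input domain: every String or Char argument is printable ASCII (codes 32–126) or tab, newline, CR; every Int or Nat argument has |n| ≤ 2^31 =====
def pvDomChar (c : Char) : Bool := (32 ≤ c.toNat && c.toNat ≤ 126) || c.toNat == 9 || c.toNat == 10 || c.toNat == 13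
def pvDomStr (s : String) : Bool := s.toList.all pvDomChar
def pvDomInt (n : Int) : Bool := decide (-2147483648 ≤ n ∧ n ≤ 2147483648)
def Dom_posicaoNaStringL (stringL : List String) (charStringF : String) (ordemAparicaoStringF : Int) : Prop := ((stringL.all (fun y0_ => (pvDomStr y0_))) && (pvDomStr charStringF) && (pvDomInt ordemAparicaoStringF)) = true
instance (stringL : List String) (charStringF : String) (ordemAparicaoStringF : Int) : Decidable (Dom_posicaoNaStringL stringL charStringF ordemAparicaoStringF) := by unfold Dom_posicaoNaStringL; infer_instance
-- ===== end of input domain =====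

-- B replaces A's counting scan (early exit on the k-th match) by a materialized table of
-- all match indices plus a direct positional lookup guarded by 1 ≤ k ≤ len (objective: simpler).

-- ===== PORT A =====
-- the for-loop of A as structural recursion over the same state (i, ordemAparicao)
def pvGoA : List String → String → Int → Int → Int → Option Int
  | [], _, _, _, _ => none
  | e :: rest, c, k, i, cnt =>
    if e == c then
      (if cnt + 1 == k then some i else pvGoA rest c k (i + 1) (cnt + 1))
    else pvGoA rest c k (i + 1) cnt

def posicaoNaStringL (stringL : List String) (charStringF : String) (ordemAparicaoStringF : Int) : Option Int :=
  pvGoA stringL charStringF ordemAparicaoStringF 0 0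

-- ===== PORT B =====
-- positions = [i for i, c in enumerate(stringL) if c == charStringF]
def pvPositions (stringL : List String) (charStringF : String) : List Int :=
  (PySem.List.enumerate stringL 0).filterMap (fun p => if p.2 == charStringF then some p.1 else none)

def posicaoNaStringL_alt (stringL : List String) (charStringF : String) (ordemAparicaoStringF : Int) : Option Int :=
  let positions := pvPositions stringL charStringF
  if 1 ≤ ordemAparicaoStringF ∧ ordemAparicaoStringF ≤ (positions.length : Int) then
    PySem.List.pyGet? positions (ordemAparicaoStringF - 1)
  else none

-- ===== PRECONDITION & SPEC =====
def Spec_posicaoNaStringL (stringL : List String) (charStringF : String) (ordemAparicaoStringF : Int) (out : Option Int) : Prop := out = posicaoNaStringL_alt stringL charStringF ordemAparicaoStringF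
instance (stringL : List String) (charStringF : String) (ordemAparicaoStringF : Int) (out : Option Int) : Decidable (Spec_posicaoNaStringL stringL charStringF ordemAparicaoStringF out) := by unfold Spec_posicaoNaStringL; infer_instance

-- ===== CLAIM (what is proved, stated in full; the proofs are below) =====
def Claim_equal_posicaoNaStringL : Prop := ∀ (stringL : List String) (charStringF : String) (ordemAparicaoStringF : Int), Dom_posicaoNaStringL stringL charStringF ordemAparicaoStringF → Spec_posicaoNaStringL stringL charStringF ordemAparicaoStringF (posicaoNaStringL stringL charStringF ordemAparicaoStringF)

-- ===== LEMMAS AND PROOFS =====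

-- positions with an arbitrary start index, in the shape of A's recursion
def pvP (c : String) : List String → Int → List Int
  | [], _ => []
  | e :: rest, i => if e == c then i :: pvP c rest (i + 1) else pvP c rest (i + 1)

theorem pvPositions_eq_pvP (c : String) : ∀ (l : List String) (s : Int),
    (PySem.List.enumerate l s).filterMap (fun p => if p.2 == c then some p.1 else none) = pvP c l s := by
  intro l
  induction l with
  | nil => intro s; simp [PySem.List.enumerate_nil, pvP]
  | cons e rest ih =>
    intro s
    simp only [PySem.List.enumerate_cons, List.filterMap_cons, pvP, ih]
    by_cases h : e == c
    · simp [h]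
    · simp [h]

theorem pyGet?_cons_pos (x : Int) (xs : List Int) (j : Int) (hj : 1 ≤ j) :
    PySem.List.pyGet? (x :: xs) j = PySem.List.pyGet? xs (j - 1) := by
  have h0 : (0:Int) ≤ j := by omega
  have h1 : (0:Int) ≤ j - 1 := by omega
  rw [PySem.List.pyGet?_of_nonneg _ h0, PySem.List.pyGet?_of_nonneg _ h1]
  have h2 : j.toNat = (j - 1).toNat + 1 := by omega
  rw [h2]
  simp

theorem pvGoA_eq (c : String) : ∀ (l : List String) (k i cnt : Int),
    pvGoA l c k i cnt =
      (if 1 ≤ k - cnt ∧ k - cnt ≤ ((pvP c l i).length : Int) then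
        PySem.List.pyGet? (pvP c l i) (k - cnt - 1)
      else none) := by
  intro l
  induction l with
  | nil =>
    intro k i cnt
    simp only [pvGoA, pvP]
    split
    · simp [PySem.List.pyGet?]
    · rfl
  | cons e rest ih =>
    intro k i cnt
    simp only [pvGoA, pvP]
    by_cases hc : e == c
    · rw [if_pos hc, if_pos hc]
      by_cases hk : cnt + 1 == k
      · have hkeq : k - cnt = 1 := by
          have : cnt + 1 = k := by simpa using hk
          omega
        rw [if_pos hk, if_pos (by simp; omega)]
        rw [hkeq]
        norm_num [PySem.List.pyGet?_zero_cons]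
      · have hk1 : k - cnt ≠ 1 := by
          intro h
          exact hk (by simpa using (by omega : cnt + 1 = k))
        rw [if_neg hk, ih]
        by_cases hco : 1 ≤ k - (cnt + 1) ∧ k - (cnt + 1) ≤ ((pvP c rest (i + 1)).length : Int)
        · rw [if_pos hco, if_pos (by simp; omega)]
          rw [pyGet?_cons_pos _ _ _ (by omega)]
          congr 1
          omega
        · rw [if_neg hco, if_neg (by simp; omega)]
    · rw [if_neg hc, if_neg hc]
      exact ih k (i + 1) cnt

-- ===== VERDICT (by name: the statement is the Claim_ definition above) =====
theorem posicaoNaStringL_spec : Claim_equal_posicaoNaStringL := by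
  intro l c k _
  show posicaoNaStringL l c k = posicaoNaStringL_alt l c k
  unfold posicaoNaStringL posicaoNaStringL_alt pvPositions
  rw [pvPositions_eq_pvP, pvGoA_eq]
  simp
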